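-- pv_equiv track=rewrite | github.com/gitter-badger/BEE2.4 | src/utils.py | iter_grid
-- ===== SOURCE A (Python) =====
-- from typing import (
--     Union,
--     Tuple,
--     SupportsFloat, Iterator,
-- )
--
-- def iter_grid(
--         max_x: int,
--         max_y: int,
--         min_x: int=0,
--         min_y: int=0,
--         stride: int=1,
--         ) -> Iterator[Tuple[int, int]]:
--     """Loop over a rectangular grid area."""
--     for x in range(min_x, max_x, stride):
--         for y in range(min_y, max_y, stride):
--             yield x, y
-- ===== SOURCE B (Python) =====
-- def iter_grid(
--         max_x: int,
--         max_y: int,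
--         min_x: int = 0,
--         min_y: int = 0,
--         stride: int = 1,
--         ):
--     """Loop over a rectangular grid area: one flat loop, divmod index split."""
--     nx = len(range(min_x, max_x, stride))
--     ny = len(range(min_y, max_y, stride))
--     for i in range(nx * ny):
--         yield min_x + (i // ny) * stride, min_y + (i % ny) * stride
-- ===== Notes on version B (the rewrite author's own statement) =====
-- stated objective: alternative
-- what changed: Replaces the two nested range loops by a single flat loop over range(nx*ny) that recovers the (x, y) coordinates by divmod index decomposition, preserving x-outer/y-inner order.
import Mathlib
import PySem

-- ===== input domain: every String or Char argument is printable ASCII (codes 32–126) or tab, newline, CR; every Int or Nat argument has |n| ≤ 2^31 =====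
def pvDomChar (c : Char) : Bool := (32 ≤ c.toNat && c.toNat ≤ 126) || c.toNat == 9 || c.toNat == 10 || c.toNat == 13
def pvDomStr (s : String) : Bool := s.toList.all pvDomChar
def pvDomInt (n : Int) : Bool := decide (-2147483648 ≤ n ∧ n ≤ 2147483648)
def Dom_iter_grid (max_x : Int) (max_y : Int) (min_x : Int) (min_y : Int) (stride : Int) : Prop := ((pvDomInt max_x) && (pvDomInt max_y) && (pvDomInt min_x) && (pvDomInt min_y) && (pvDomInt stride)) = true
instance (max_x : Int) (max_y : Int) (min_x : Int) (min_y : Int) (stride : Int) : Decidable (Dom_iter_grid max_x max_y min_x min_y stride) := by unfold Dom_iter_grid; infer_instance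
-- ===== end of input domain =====

-- B replaces A's two nested range loops by one flat loop over range(nx*ny) with divmod index
-- decomposition (alternative decomposition, same cost); equivalence proved for stride ≠ 0
-- (Python's range raises ValueError for stride 0, excluded by Pre_).


-- ===== PORT A =====
-- for x in range(min_x, max_x, stride): for y in range(min_y, max_y, stride): yield x, y
def iter_grid (max_x : Int) (max_y : Int) (min_x : Int) (min_y : Int) (stride : Int) : List (Int × Int) :=
  (PySem.List.pyRange min_x max_x stride).foldl
    (fun acc x =>
      (PySem.List.pyRange min_y max_y stride).foldl (fun acc2 y => acc2 ++ [(x, y)]) acc)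
    []

-- ===== PORT B =====
-- nx = len(range(min_x, max_x, stride)); ny = len(range(min_y, max_y, stride))
-- for i in range(nx*ny): yield min_x + (i // ny) * stride, min_y + (i % ny) * stride
def iter_grid_alt (max_x : Int) (max_y : Int) (min_x : Int) (min_y : Int) (stride : Int) : List (Int × Int) :=
  let nx : Nat := (PySem.List.pyRange min_x max_x stride).length
  let ny : Nat := (PySem.List.pyRange min_y max_y stride).length
  (PySem.List.pyRange 0 ((nx : Int) * (ny : Int)) 1).map
    (fun i => (min_x + PySem.Int.floordiv i (ny : Int) * stride,
               min_y + PySem.Int.mod i (ny : Int) * stride))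

-- ===== PRECONDITION & SPEC =====
-- Pre_ excludes exactly stride = 0, where Python's range(...) raises ValueError in both A and B.
def Pre_iter_grid (max_x : Int) (max_y : Int) (min_x : Int) (min_y : Int) (stride : Int) : Prop :=
  stride ≠ 0
instance (max_x : Int) (max_y : Int) (min_x : Int) (min_y : Int) (stride : Int) : Decidable (Pre_iter_grid max_x max_y min_x min_y stride) := by unfold Pre_iter_grid; infer_instance

def pvWitness_iter_grid : Int × Int × Int × Int × Int := (4, 3, 0, 0, 1)

def Spec_iter_grid (max_x : Int) (max_y : Int) (min_x : Int) (min_y : Int) (stride : Int) (out : List (Int × Int)) : Prop := out = iter_grid_alt max_x max_y min_x min_y stride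
instance (max_x : Int) (max_y : Int) (min_x : Int) (min_y : Int) (stride : Int) (out : List (Int × Int)) : Decidable (Spec_iter_grid max_x max_y min_x min_y stride out) := by unfold Spec_iter_grid; infer_instance

-- ===== CLAIM (what is proved, stated in full; the proofs are below) =====
def Claim_equal_iter_grid : Prop := ∀ (max_x : Int) (max_y : Int) (min_x : Int) (min_y : Int) (stride : Int), Dom_iter_grid max_x max_y min_x min_y stride → Pre_iter_grid max_x max_y min_x min_y stride → Spec_iter_grid max_x max_y min_x min_y stride (iter_grid max_x max_y min_x min_y stride)

-- ===== LEMMAS AND PROOFS =====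

-- a nonempty-step pyRange is the map of its index formula over List.range of its own length
lemma pyRange_canon (a b s : Int) (hs : s ≠ 0) :
    PySem.List.pyRange a b s
      = (List.range (PySem.List.pyRange a b s).length).map (fun (k : Nat) => a + s * (k : Int)) := by
  simp [PySem.List.pyRange, hs]

-- A's nested loop, unrolled to a flatMap
lemma foldl_nested (xs ys : List Int) (acc : List (Int × Int)) :
    xs.foldl (fun acc x => ys.foldl (fun acc2 y => acc2 ++ [(x, y)]) acc) acc
      = acc ++ xs.flatMap (fun x => ys.map (fun y => (x, y))) := by
  induction xs generalizing acc with
  | nil => simp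
  | cons x xs ih =>
      rw [List.foldl_cons, PySem.List.foldl_append_singleton_eq_map, ih, List.flatMap_cons,
        List.append_assoc]

-- B's flat divmod enumeration equals the nested flatMap enumeration
lemma flat_divmod (g : Int → Int → Int × Int) (nx ny : Nat) :
    (PySem.List.pyRange 0 ((nx : Int) * (ny : Int)) 1).map
        (fun i => g (PySem.Int.floordiv i (ny : Int)) (PySem.Int.mod i (ny : Int)))
      = (List.range nx).flatMap (fun (j : Nat) => (List.range ny).map (fun (k : Nat) => g (j : Int) (k : Int))) := by
  rcases Nat.eq_zero_or_pos ny with h0 | hpos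
  · subst h0
    simp [PySem.List.pyRange_one_eq_nil le_rfl]
  · have hny : (0 : Int) < (ny : Int) := by exact_mod_cast hpos
    induction nx with
    | zero => simp [PySem.List.pyRange_one_eq_nil le_rfl]
    | succ n ih =>
        have hsplit : PySem.List.pyRange 0 (((n + 1 : Nat) : Int) * (ny : Int)) 1
            = PySem.List.pyRange 0 ((n : Int) * (ny : Int)) 1
              ++ PySem.List.pyRange ((n : Int) * (ny : Int)) ((n : Int) * (ny : Int) + (ny : Int)) 1 := by
          have h1 : (0 : Int) ≤ (n : Int) * (ny : Int) := by positivity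
          have h2 : (n : Int) * (ny : Int) ≤ (n : Int) * (ny : Int) + (ny : Int) := by omega
          have h3 : ((n + 1 : Nat) : Int) * (ny : Int) = (n : Int) * (ny : Int) + (ny : Int) := by
            push_cast; ring
          rw [h3]
          exact PySem.List.pyRange_one_append 0 ((n : Int) * (ny : Int))
            ((n : Int) * (ny : Int) + (ny : Int)) h1 h2
        rw [hsplit, List.map_append, ih, List.range_succ, List.flatMap_append]
        congr 1
        rw [PySem.List.pyRange_one]
        have hto : ((n : Int) * (ny : Int) + (ny : Int) - (n : Int) * (ny : Int)).toNat = ny := by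
          omega
        rw [hto, List.map_map]
        simp only [List.flatMap_cons, List.flatMap_nil, List.append_nil]
        apply List.map_congr_left
        intro k hk
        have hk' : (k : Int) < (ny : Int) := by exact_mod_cast List.mem_range.mp hk
        have hk0 : (0 : Int) ≤ (k : Int) := Int.natCast_nonneg k
        have harg : (n : Int) * (ny : Int) + (k : Int) = (k : Int) + (ny : Int) * (n : Int) := by ring
        have hd : PySem.Int.floordiv ((n : Int) * (ny : Int) + (k : Int)) (ny : Int) = (n : Int) := by
          rw [PySem.Int.floordiv_eq_ediv_of_pos hny, harg,
            Int.add_mul_ediv_left (k : Int) (n : Int) (by omega),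
            Int.ediv_eq_zero_of_lt hk0 hk', zero_add]
        have hm : PySem.Int.mod ((n : Int) * (ny : Int) + (k : Int)) (ny : Int) = (k : Int) := by
          rw [PySem.Int.mod_eq_emod_of_pos hny, harg, Int.add_mul_emod_self_left,
            Int.emod_eq_of_lt hk0 hk']
        simp only [Function.comp_apply]
        rw [hd, hm]

-- ===== VERDICT (by name: the statement is the Claim_ definition above) =====
theorem iter_grid_spec : Claim_equal_iter_grid := by
  intro max_x max_y min_x min_y stride _ hs
  unfold Spec_iter_grid iter_grid iter_grid_alt
  rw [foldl_nested, List.nil_append,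
    flat_divmod (fun j k => (min_x + j * stride, min_y + k * stride))
      (PySem.List.pyRange min_x max_x stride).length
      (PySem.List.pyRange min_y max_y stride).length]
  conv_lhs =>
    rw [pyRange_canon min_x max_x stride hs, pyRange_canon min_y max_y stride hs]
  simp only [List.flatMap_map, List.map_map, Function.comp_def]
  simp [mul_comm]
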